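-- pv_equiv track=rewrite | github.com/ly4k/Certipy | certipy/forge.py | dn_to_components
-- ===== SOURCE A (Python) =====
-- def dn_to_components(dn):
--     components = []
--     component = ""
--     escape_sequence = False
--     for c in dn:
--         if c == "\\":
--             escape_sequence = True
--         elif escape_sequence and c != " ":
--             escape_sequence = False
--         elif c == ",":
--             if "=" in component:
--                 attr_name, _, value = component.partition("=")
--                 component = (attr_name.strip().upper(), value.strip())
--                 components.append(component)
--                 component = ""
--                 continue
--
--         component += c
--
--     attr_name, _, value = component.partition("=")
--     component = (attr_name.strip(), value.strip())
--     components.append(component)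
--     return components
-- ===== SOURCE B (Python) =====
-- def dn_to_components(dn):
--     # Two staged passes: first cut the string at every unescaped comma into raw
--     # segments, then re-join the cuts that were not real component boundaries
--     # (the accumulated component has no '='), partitioning each finished one.
--     segments = []
--     seg = []
--     esc = False
--     for c in dn:
--         if not esc and c == ",":
--             segments.append("".join(seg))
--             seg = []
--         else:
--             seg.append(c)
--         esc = c == "\\" or (esc and c == " ")
--     segments.append("".join(seg))
--
--     components = []
--     pending = segments[0]
--     for seg in segments[1:]:
--         if "=" in pending:
--             attr, _, value = pending.partition("=")
--             components.append((attr.strip().upper(), value.strip()))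
--             pending = seg
--         else:
--             pending = pending + "," + seg
--     attr, _, value = pending.partition("=")
--     components.append((attr.strip(), value.strip()))
--     return components
-- ===== Notes on version B (the rewrite author's own statement) =====
-- stated objective: alternative
-- what changed: Replaces A's single accumulate-and-split character scan by two staged passes: pass 1 cuts the string at every unescaped comma into raw segments, pass 2 folds over the segments re-joining (with the comma) each cut whose accumulated component lacks an equals sign, partitioning the finished ones.
import Mathlib
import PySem

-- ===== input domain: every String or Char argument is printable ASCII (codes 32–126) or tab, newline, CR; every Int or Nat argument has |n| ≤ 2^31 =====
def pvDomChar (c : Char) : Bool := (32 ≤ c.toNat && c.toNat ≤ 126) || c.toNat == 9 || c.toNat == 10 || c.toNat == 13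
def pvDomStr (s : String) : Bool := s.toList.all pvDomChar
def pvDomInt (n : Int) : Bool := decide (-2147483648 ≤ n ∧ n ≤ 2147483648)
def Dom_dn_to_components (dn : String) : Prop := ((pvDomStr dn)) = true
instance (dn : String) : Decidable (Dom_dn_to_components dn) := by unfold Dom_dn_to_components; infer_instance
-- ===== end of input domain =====

-- B replaces A's single accumulate-and-split scan by two staged passes
-- (cut at every unescaped comma, then re-join the non-boundary cuts); objective: alternative.

-- ===== PORT A =====
-- hand port of str.partition("="): split at the FIRST '='; when absent Python's
-- partition yields ("", "") for sep/after, so (cs, []) gives the same two pieces used.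
def pvPartitionEq (cs : List Char) : List Char × List Char :=
  match cs with
  | [] => ([], [])
  | c :: rest =>
    if c = '=' then ([], rest)
    else
      let p := pvPartitionEq rest
      (c :: p.1, p.2)

-- loop body of A: state = (components, component, escape_sequence)
def pvStepA (s : List (String × String) × List Char × Bool) (c : Char) :
    List (String × String) × List Char × Bool :=
  let components := s.1
  let component := s.2.1
  let esc := s.2.2
  if c = '\\' then (components, component ++ [c], true)
  else if esc = true ∧ c ≠ ' ' then (components, component ++ [c], false)
  else if c = ',' then
    if PySem.Chars.isIn ['='] component then
      let p := pvPartitionEq component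
      (components ++ [(String.ofList (PySem.Chars.upper (PySem.Chars.strip p.1)),
                       String.ofList (PySem.Chars.strip p.2))], [], esc)
    else (components, component ++ [c], esc)
  else (components, component ++ [c], esc)

def dn_to_components (dn : String) : List (String × String) :=
  let s := dn.toList.foldl pvStepA ([], [], false)
  let p := pvPartitionEq s.2.1
  s.1 ++ [(String.ofList (PySem.Chars.strip p.1), String.ofList (PySem.Chars.strip p.2))]

-- ===== PORT B =====
-- pass 1 body of Source B: state = (segments, seg, esc); cut at an unescaped comma,
-- otherwise append the char; escape flag updated exactly as Source B's last loop line
def pvCutStep (s : List (List Char) × List Char × Bool) (c : Char) :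
    List (List Char) × List Char × Bool :=
  let segments := s.1
  let seg := s.2.1
  let esc := s.2.2
  let cut : List (List Char) × List Char :=
    if esc = false ∧ c = ',' then (segments ++ [seg], []) else (segments, seg ++ [c])
  (cut.1, cut.2, (c == '\\' || (esc && c == ' ')))

-- pass 2 body of Source B: state = (components, pending)
def pvMergeStep (s : List (String × String) × List Char) (seg : List Char) :
    List (String × String) × List Char :=
  let components := s.1
  let pending := s.2
  if PySem.Chars.isIn ['='] pending then
    let p := pvPartitionEq pending
    (components ++ [(String.ofList (PySem.Chars.upper (PySem.Chars.strip p.1)),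
                     String.ofList (PySem.Chars.strip p.2))], seg)
  else (components, pending ++ ',' :: seg)

def dn_to_components_alt (dn : String) : List (String × String) :=
  let s := dn.toList.foldl pvCutStep ([], [], false)
  let segments := s.1 ++ [s.2.1]      -- the final segments.append("".join(seg))
  let m := segments.tail.foldl pvMergeStep ([], segments.headD [])
  let p := pvPartitionEq m.2
  m.1 ++ [(String.ofList (PySem.Chars.strip p.1), String.ofList (PySem.Chars.strip p.2))]

-- ===== PRECONDITION & SPEC =====
def Spec_dn_to_components (dn : String) (out : List (String × String)) : Prop := out = dn_to_components_alt dn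
instance (dn : String) (out : List (String × String)) : Decidable (Spec_dn_to_components dn out) := by unfold Spec_dn_to_components; infer_instance

-- ===== CLAIM =====
def Claim_equal_dn_to_components : Prop := ∀ (dn : String), Dom_dn_to_components dn → Spec_dn_to_components dn (dn_to_components dn)

-- ===== LEMMAS AND PROOFS =====

-- shared finishing step: append the partition of the last open component
def pvFinish (comps : List (String × String)) (pending : List Char) : List (String × String) :=
  let p := pvPartitionEq pending
  comps ++ [(String.ofList (PySem.Chars.strip p.1), String.ofList (PySem.Chars.strip p.2))]

-- pass 1 with the final append, as a (nonempty) segment list plus escape flag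
def pvSegsAll (cs seg : List Char) (esc : Bool) : List (List Char) × Bool :=
  let s := cs.foldl pvCutStep ([], seg, esc)
  (s.1 ++ [s.2.1], s.2.2)

-- the whole of B from a mid-scan state
def pvRunB (cs : List Char) (comps : List (String × String)) (pending : List Char)
    (esc : Bool) : List (String × String) :=
  let sa := pvSegsAll cs pending esc
  let m := sa.1.tail.foldl pvMergeStep (comps, sa.1.headD [])
  pvFinish m.1 m.2

theorem pvAlt_eq_runB (dn : String) : dn_to_components_alt dn = pvRunB dn.toList [] [] false := rfl

theorem pvA_eq_finish (dn : String) :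
    dn_to_components dn =
      pvFinish (dn.toList.foldl pvStepA ([], [], false)).1
        (dn.toList.foldl pvStepA ([], [], false)).2.1 := rfl

-- the segments accumulator of pass 1 only collects output
theorem pvCut_acc (cs : List Char) :
    ∀ (segs0 : List (List Char)) (seg : List Char) (esc : Bool),
    cs.foldl pvCutStep (segs0, seg, esc) =
      (segs0 ++ (cs.foldl pvCutStep ([], seg, esc)).1,
       (cs.foldl pvCutStep ([], seg, esc)).2) := by
  induction cs with
  | nil => intro segs0 seg esc; simp
  | cons c rest ih =>
    intro segs0 seg esc
    simp only [List.foldl_cons]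
    by_cases h : esc = false ∧ c = ','
    · simp only [pvCutStep, if_pos h, List.nil_append]
      rw [ih (segs0 ++ [seg]) [] _, ih [seg] [] _]
      simp
    · simp only [pvCutStep, if_neg h, List.nil_append]
      rw [ih segs0 (seg ++ [c]) _, ih [] (seg ++ [c]) _]

-- a prefix of the open segment ends up prepended to the first produced segment
theorem pvCut_prefix (cs pre : List Char) :
    ∀ (seg : List Char) (esc : Bool),
    pvSegsAll cs (pre ++ seg) esc =
      ((pvSegsAll cs seg esc).1.modifyHead (pre ++ ·), (pvSegsAll cs seg esc).2) := by
  induction cs with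
  | nil => intro seg esc; simp [pvSegsAll]
  | cons c rest ih =>
    intro seg esc
    simp only [pvSegsAll, List.foldl_cons]
    by_cases h : esc = false ∧ c = ','
    · simp only [pvCutStep, if_pos h, List.nil_append]
      rw [pvCut_acc rest [pre ++ seg] [] _, pvCut_acc rest [seg] [] _]
      simp
    · simp only [pvCutStep, if_neg h, List.nil_append]
      have : pre ++ seg ++ [c] = pre ++ (seg ++ [c]) := by simp
      rw [this]
      have := ih (seg ++ [c]) (c == '\\' || (esc && c == ' '))
      simp only [pvSegsAll] at this
      rw [this]

-- pass-1 step lemmas for pvSegsAll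
theorem pvSegsAll_cons_nocut (c : Char) (cs seg seg' : List Char) (esc esc' : Bool)
    (h : pvCutStep ([], seg, esc) c = ([], seg', esc')) :
    pvSegsAll (c :: cs) seg esc = pvSegsAll cs seg' esc' := by
  simp [pvSegsAll, List.foldl_cons, h]

theorem pvSegsAll_cons_cut (c : Char) (cs seg : List Char) (esc esc' : Bool)
    (h : pvCutStep ([], seg, esc) c = ([seg], [], esc')) :
    pvSegsAll (c :: cs) seg esc =
      (seg :: (pvSegsAll cs [] esc').1, (pvSegsAll cs [] esc').2) := by
  simp only [pvSegsAll, List.foldl_cons, h]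
  rw [pvCut_acc cs [seg] [] esc']
  simp

-- coupling: B run from a mid-scan state equals A's scan finished
theorem pvMain (cs : List Char) :
    ∀ (comps : List (String × String)) (pending : List Char) (esc : Bool),
    pvRunB cs comps pending esc =
      pvFinish (cs.foldl pvStepA (comps, pending, esc)).1
        (cs.foldl pvStepA (comps, pending, esc)).2.1 := by
  induction cs with
  | nil => intro comps pending esc; simp [pvRunB, pvSegsAll]
  | cons c rest ih =>
    intro comps pending esc
    by_cases h1 : c = '\\'
    · subst h1
      have hcut : pvCutStep ([], pending, esc) '\\' = ([], pending ++ ['\\'], true) := by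
        simp [pvCutStep]
      have hstep : pvStepA (comps, pending, esc) '\\' = (comps, pending ++ ['\\'], true) := by
        simp [pvStepA]
      simp only [pvRunB, List.foldl_cons, hstep, pvSegsAll_cons_nocut _ _ _ _ _ _ hcut]
      have := ih comps (pending ++ ['\\']) true
      simp only [pvRunB] at this
      exact this
    · by_cases h2 : esc = true ∧ c ≠ ' '
      · obtain ⟨he, hs⟩ := h2
        subst he
        have hcut : pvCutStep ([], pending, true) c = ([], pending ++ [c], false) := by
          simp [pvCutStep, h1, hs]
        have hstep : pvStepA (comps, pending, true) c = (comps, pending ++ [c], false) := by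
          simp [pvStepA, h1, hs]
        simp only [pvRunB, List.foldl_cons, hstep, pvSegsAll_cons_nocut _ _ _ _ _ _ hcut]
        have := ih comps (pending ++ [c]) false
        simp only [pvRunB] at this
        exact this
      · by_cases h3 : c = ','
        · subst h3
          have he : esc = false := by
            cases esc with
            | false => rfl
            | true => exact absurd ⟨rfl, by decide⟩ h2
          subst he
          have hcut : pvCutStep ([], pending, false) ',' = ([pending], [], false) := by
            simp [pvCutStep]
          obtain ⟨h, t, hq⟩ :=
            List.exists_cons_of_ne_nil (l := (pvSegsAll rest [] false).1)
              (by simp [pvSegsAll])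
          by_cases h4 : PySem.Chars.isIn ['='] pending = true
          · -- A splits too: both continue with the component emitted
            have hstep : pvStepA (comps, pending, false) ',' =
                (comps ++ [(String.ofList (PySem.Chars.upper
                    (PySem.Chars.strip (pvPartitionEq pending).1)),
                  String.ofList (PySem.Chars.strip (pvPartitionEq pending).2))], [], false) := by
              simp [pvStepA, h1, h4]
            have hm : pvMergeStep (comps, pending) h =
                (comps ++ [(String.ofList (PySem.Chars.upper
                    (PySem.Chars.strip (pvPartitionEq pending).1)),
                  String.ofList (PySem.Chars.strip (pvPartitionEq pending).2))], h) := by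
              simp [pvMergeStep, h4]
            have this' := ih (comps ++ [(String.ofList (PySem.Chars.upper
                (PySem.Chars.strip (pvPartitionEq pending).1)),
              String.ofList (PySem.Chars.strip (pvPartitionEq pending).2))]) [] false
            simp only [pvRunB, hq, List.tail_cons, List.headD_cons] at this'
            simp only [pvRunB, List.foldl_cons, hstep,
              pvSegsAll_cons_cut _ _ _ _ _ hcut, hq, List.tail_cons, List.headD_cons, hm]
            exact this'
          · -- A keeps the comma: B re-joins the two segments with a comma
            have h4' : PySem.Chars.isIn ['='] pending = false := by simpa using h4
            have hstep : pvStepA (comps, pending, false) ',' =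
                (comps, pending ++ [','], false) := by
              simp [pvStepA, h1, h4']
            have hm : pvMergeStep (comps, pending) h = (comps, pending ++ ',' :: h) := by
              simp [pvMergeStep, h4']
            have this' := ih comps (pending ++ [',']) false
            simp only [pvRunB] at this'
            have hp := pvCut_prefix rest (pending ++ [',']) [] false
            simp only [List.append_nil] at hp
            rw [hp] at this'
            simp only [hq, List.modifyHead, List.tail_cons, List.headD_cons,
              List.append_assoc, List.singleton_append] at this'
            simp only [pvRunB, List.foldl_cons, hstep,
              pvSegsAll_cons_cut _ _ _ _ _ hcut, hq, List.tail_cons, List.headD_cons, hm]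
            exact this'
        · -- plain append on both sides; the escape flag is unchanged
          have hb : (c == '\\' || (esc && c == ' ')) = esc := by
            cases esc with
            | false => simp [h1]
            | true =>
              have hsp : c = ' ' := by
                by_contra hs
                exact h2 ⟨rfl, hs⟩
              simp [hsp]
          have hcut : pvCutStep ([], pending, esc) c = ([], pending ++ [c], esc) := by
            simp [pvCutStep, h3, hb]
          have hstep : pvStepA (comps, pending, esc) c = (comps, pending ++ [c], esc) := by
            simp [pvStepA, h1, h2, h3]
          simp only [pvRunB, List.foldl_cons, hstep, pvSegsAll_cons_nocut _ _ _ _ _ _ hcut]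
          have := ih comps (pending ++ [c]) esc
          simp only [pvRunB] at this
          exact this

-- ===== VERDICT =====
theorem dn_to_components_spec : Claim_equal_dn_to_components := by
  intro dn _
  unfold Spec_dn_to_components
  rw [pvAlt_eq_runB, pvA_eq_finish, pvMain]
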